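-- pv_equiv track=rewrite | github.com/AEM001/nano-vllm-1 | tutorial/04_kvcache_and_blocks.py | compute_slot_mapping
-- ===== SOURCE A (Python) =====
-- def compute_slot_mapping(block_table: list[int], seq_len: int, block_size: int) -> list[int]:
--     slots = []
--     for pos in range(seq_len):
--         block_idx = pos // block_size
--         offset    = pos % block_size
--         physical_block = block_table[block_idx]
--         slot = physical_block * block_size + offset
--         slots.append(slot)
--     return slots
-- ===== SOURCE B (Python) =====
-- def compute_slot_mapping(block_table: list[int], seq_len: int, block_size: int) -> list[int]:
--     if seq_len <= 0:
--         return []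
--     slots = []
--     num_blocks = (seq_len + block_size - 1) // block_size
--     for block_idx in range(num_blocks):
--         base = block_table[block_idx] * block_size
--         start = block_idx * block_size
--         for offset in range(block_size):
--             if start + offset >= seq_len:
--                 break
--             slots.append(base + offset)
--     return slots
-- ===== Notes on version B (the rewrite author's own statement) =====
-- stated objective: alternative
-- what changed: B iterates block-by-block (one table lookup per block, inner offset loop with a break at seq_len) instead of A's flat per-position loop with div/mod and one table lookup per position.
-- outside the precondition, e.g. on compute_slot_mapping([5], 3, -2): A returns [-10, -11, -10], B returns []
import Mathlib
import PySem

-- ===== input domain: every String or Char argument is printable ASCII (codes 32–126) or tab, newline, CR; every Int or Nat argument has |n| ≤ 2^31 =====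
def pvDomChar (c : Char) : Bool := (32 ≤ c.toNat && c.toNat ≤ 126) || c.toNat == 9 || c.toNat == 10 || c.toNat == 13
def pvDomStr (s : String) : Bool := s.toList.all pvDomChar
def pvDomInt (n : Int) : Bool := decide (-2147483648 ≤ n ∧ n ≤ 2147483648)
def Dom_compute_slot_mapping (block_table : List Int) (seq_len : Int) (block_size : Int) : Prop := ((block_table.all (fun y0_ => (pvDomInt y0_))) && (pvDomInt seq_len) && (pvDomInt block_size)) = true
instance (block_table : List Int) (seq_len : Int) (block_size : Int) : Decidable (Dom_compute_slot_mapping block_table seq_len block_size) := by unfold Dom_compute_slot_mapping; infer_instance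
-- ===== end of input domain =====

-- B walks the table block-by-block (one lookup per block, inner offset loop with a break at seq_len)
-- instead of A's flat per-position loop with div/mod; equality of the return values is proved on Pre_.

-- ===== PORT A =====
def compute_slot_mapping (block_table : List Int) (seq_len : Int) (block_size : Int) : List Int :=
  (PySem.List.pyRange 0 seq_len 1).foldl
    (fun slots pos =>
      let block_idx := PySem.Int.floordiv pos block_size
      let offset := PySem.Int.mod pos block_size
      let physical_block := PySem.List.pyGetD block_table block_idx 0   -- block_table[block_idx]; in range under Pre_
      slots ++ [physical_block * block_size + offset]) []

-- ===== PORT B =====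
def compute_slot_mapping_alt (block_table : List Int) (seq_len : Int) (block_size : Int) : List Int :=
  if seq_len ≤ 0 then []
  else
    let num_blocks := PySem.Int.floordiv (seq_len + block_size - 1) block_size
    (PySem.List.pyRange 0 num_blocks 1).foldl
      (fun slots block_idx =>
        let base := PySem.List.pyGetD block_table block_idx 0 * block_size   -- block_table[block_idx]; in range under Pre_
        let start := block_idx * block_size
        ((PySem.List.pyRange 0 block_size 1).foldl
          (fun st offset =>
            if st.2 then st                                                  -- after the break
            else if seq_len ≤ start + offset then (st.1, true)               -- break
            else (st.1 ++ [base + offset], false))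
          (slots, false)).1)
      []

-- ===== PRECONDITION & SPEC =====
-- Pre_ excludes block_size ≤ 0 with seq_len > 0 — there A raises ZeroDivisionError or IndexError, or returns
-- slots read through Python's negative-index wraparound, outside the function's natural domain of positive
-- block sizes — and tables too short for seq_len, where A raises IndexError.
def Pre_compute_slot_mapping (block_table : List Int) (seq_len : Int) (block_size : Int) : Prop :=
  seq_len ≤ 0 ∨ (1 ≤ block_size ∧ seq_len ≤ (block_table.length : Int) * block_size)
instance (block_table : List Int) (seq_len : Int) (block_size : Int) : Decidable (Pre_compute_slot_mapping block_table seq_len block_size) := by unfold Pre_compute_slot_mapping; infer_instance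

def pvWitness_compute_slot_mapping : List Int × Int × Int := ([3, 7], 5, 4)

def Spec_compute_slot_mapping (block_table : List Int) (seq_len : Int) (block_size : Int) (out : List Int) : Prop := out = compute_slot_mapping_alt block_table seq_len block_size
instance (block_table : List Int) (seq_len : Int) (block_size : Int) (out : List Int) : Decidable (Spec_compute_slot_mapping block_table seq_len block_size out) := by unfold Spec_compute_slot_mapping; infer_instance

-- ===== CLAIM (what is proved, stated in full; the proofs are below) =====
def Claim_equal_compute_slot_mapping : Prop := ∀ (block_table : List Int) (seq_len : Int) (block_size : Int), Dom_compute_slot_mapping block_table seq_len block_size → Pre_compute_slot_mapping block_table seq_len block_size → Spec_compute_slot_mapping block_table seq_len block_size (compute_slot_mapping block_table seq_len block_size)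

-- ===== LEMMAS AND PROOFS =====

-- B's inner offset loop with its break flag appends base + o exactly for the offsets below min b (s - start).
lemma csm_inner_pair (s base start : Int) (slots : List Int) (b : Nat) :
    (PySem.List.pyRange 0 (b : Int) 1).foldl
      (fun st offset =>
        if st.2 then st
        else if s ≤ start + offset then (st.1, true)
        else (st.1 ++ [base + offset], false))
      (slots, false)
    = (slots ++ (List.range (min b (s - start).toNat)).map (fun o : Nat => base + (o : Int)),
       decide ((s - start).toNat < b)) := by
  induction b with
  | zero => simp [PySem.List.pyRange_one_eq_nil]
  | succ b ih =>
    have hcast : ((b + 1 : Nat) : Int) = (b : Int) + 1 := by push_cast; ring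
    rw [hcast, PySem.List.pyRange_one_succ_right (by positivity), List.foldl_append, ih]
    simp only [List.foldl_cons, List.foldl_nil]
    by_cases h1 : (s - start).toNat < b
    · have e1 : min (b + 1) (s - start).toNat = min b (s - start).toNat := by omega
      simp [h1, e1, show (s - start).toNat < b + 1 by omega]
    · by_cases h2 : s ≤ start + (b : Int)
      · have e1 : min (b + 1) (s - start).toNat = min b (s - start).toNat := by omega
        simp [h1, h2, e1, show (s - start).toNat < b + 1 by omega]
      · have e1 : min b (s - start).toNat = b := by omega
        have e2 : min (b + 1) (s - start).toNat = b + 1 := by omega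
        simp [h1, h2, e1, e2, List.range_succ, show ¬ (s - start).toNat < b + 1 by omega]

-- Splitting the flat position range into per-block chunks.
lemma csm_chunks (F : Nat → Int) (G : Nat → Nat → Int) (b n : Nat) (hb : 0 < b)
    (hFG : ∀ k o, o < b → F (k * b + o) = G k o) :
    ∀ j : Nat, (List.range (min (j * b) n)).map F
      = (List.range j).flatMap (fun k => (List.range (min b (n - k * b))).map (G k)) := by
  intro j
  induction j with
  | zero => simp
  | succ j ih =>
    rw [List.range_succ, List.flatMap_append, Nat.succ_mul]
    by_cases hcase : n ≤ j * b
    · have e1 : min (j * b + b) n = min (j * b) n := by omega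
      have e2 : n - j * b = 0 := by omega
      simp [e1, e2, ih]
    · have e1 : min (j * b) n = j * b := by omega
      have e2 : min (j * b + b) n = j * b + min b (n - j * b) := by omega
      rw [e1] at ih
      rw [e2, List.range_add, List.map_append, List.map_map, ih]
      simp only [List.flatMap_cons, List.flatMap_nil, List.append_nil]
      congr 1
      apply List.map_congr_left
      intro o ho
      exact hFG j o (by have := List.mem_range.mp ho; omega)

-- A computes the p-th slot directly from p via div/mod.
lemma csm_A_map (bt : List Int) (n b : Nat) :
    compute_slot_mapping bt (n : Int) (b : Int)
      = (List.range n).map (fun p => bt.getD (p / b) 0 * (b : Int) + ((p % b : Nat) : Int)) := by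
  unfold compute_slot_mapping
  rw [PySem.List.pyRange_one, PySem.List.foldl_append_singleton_eq_map]
  simp only [List.nil_append, List.map_map, Int.sub_zero, Int.toNat_natCast]
  apply List.map_congr_left
  intro p hp
  simp only [Function.comp, zero_add, PySem.Int.floordiv_natCast, PySem.Int.mod_natCast,
    PySem.List.pyGetD_natCast]

-- ===== VERDICT (by name: the statement is the Claim_ definition above) =====
theorem compute_slot_mapping_spec : Claim_equal_compute_slot_mapping := by
  intro bt s bs hdom hpre
  unfold Spec_compute_slot_mapping
  by_cases hs : s ≤ 0
  · unfold compute_slot_mapping compute_slot_mapping_alt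
    rw [PySem.List.pyRange_one_eq_nil (by omega)]
    simp [hs]
  · obtain ⟨hb, -⟩ := hpre.resolve_left hs
    obtain ⟨n, rfl⟩ : ∃ n : Nat, s = (n : Int) := ⟨s.toNat, by omega⟩
    obtain ⟨b, rfl⟩ : ∃ m : Nat, bs = (m : Int) := ⟨bs.toNat, by omega⟩
    have hb1 : 0 < b := by omega
    have hn1 : 0 < n := by omega
    have hB : compute_slot_mapping_alt bt (n : Int) (b : Int)
        = (List.range ((n + b - 1) / b)).flatMap
            (fun k => (List.range (min b (n - k * b))).map
              (fun o : Nat => bt.getD k 0 * (b : Int) + (o : Int))) := by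
      unfold compute_slot_mapping_alt
      rw [if_neg hs]
      show (PySem.List.pyRange 0 (PySem.Int.floordiv ((n : Int) + (b : Int) - 1) (b : Int)) 1).foldl
          (fun slots block_idx =>
            ((PySem.List.pyRange 0 (b : Int) 1).foldl
              (fun st offset =>
                if st.2 then st
                else if (n : Int) ≤ block_idx * (b : Int) + offset then (st.1, true)
                else (st.1 ++ [PySem.List.pyGetD bt block_idx 0 * (b : Int) + offset], false))
              (slots, false)).1) [] = _
      have hnum : PySem.Int.floordiv ((n : Int) + (b : Int) - 1) (b : Int)
          = (((n + b - 1) / b : Nat) : Int) := by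
        rw [show ((n : Int) + (b : Int) - 1) = ((n + b - 1 : Nat) : Int) by omega,
            PySem.Int.floordiv_natCast]
      rw [hnum]
      have hfun : (fun (slots : List Int) (block_idx : Int) =>
            ((PySem.List.pyRange 0 (b : Int) 1).foldl
              (fun st offset =>
                if st.2 then st
                else if (n : Int) ≤ block_idx * (b : Int) + offset then (st.1, true)
                else (st.1 ++ [PySem.List.pyGetD bt block_idx 0 * (b : Int) + offset], false))
              (slots, false)).1)
          = fun slots block_idx =>
              slots ++ (List.range (min b ((n : Int) - block_idx * (b : Int)).toNat)).map
                (fun o : Nat => PySem.List.pyGetD bt block_idx 0 * (b : Int) + (o : Int)) := by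
        funext slots block_idx
        rw [csm_inner_pair (n : Int) (PySem.List.pyGetD bt block_idx 0 * (b : Int))
              (block_idx * (b : Int)) slots b]
      rw [hfun, PySem.List.foldl_append_eq_flatMap, List.nil_append,
          PySem.List.pyRange_one, List.flatMap_map]
      simp only [Int.sub_zero, Int.toNat_natCast, zero_add]
      congr 1
      funext k
      rw [show ((k : Int) * (b : Int)) = ((k * b : Nat) : Int) by push_cast; ring,
          show (((n : Int) - ((k * b : Nat) : Int)).toNat) = n - k * b by omega]
      simp
    rw [csm_A_map, hB]
    have hle : n ≤ ((n + b - 1) / b) * b := by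
      have h1 := Nat.div_add_mod (n + b - 1) b
      have h2 := Nat.mod_lt (n + b - 1) hb1
      rw [Nat.mul_comm]
      omega
    have hsplit := csm_chunks
        (fun p => bt.getD (p / b) 0 * (b : Int) + ((p % b : Nat) : Int))
        (fun k o => bt.getD k 0 * (b : Int) + (o : Int)) b n hb1
        (by
          intro k o ho
          have h1 : (k * b + o) / b = k := by
            rw [Nat.mul_comm, Nat.mul_add_div hb1, Nat.div_eq_of_lt ho, Nat.add_zero]
          have h2 : (k * b + o) % b = o := by
            rw [Nat.mul_comm, Nat.mul_add_mod, Nat.mod_eq_of_lt ho]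
          simp [h1, h2])
        ((n + b - 1) / b)
    rw [show min (((n + b - 1) / b) * b) n = n by omega] at hsplit
    exact hsplit
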